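-- pv_equiv track=rewrite | github.com/aau-network-security/richkit | richkit/retrieve/x509.py | get_lcs_apex
-- ===== SOURCE A (Python) =====
-- def get_lcs_apex(apex):
--     """
--     The longest common substring of an array
--     :param apex: apex array
--     :return: The longest common substring
--     """
--     lcs_num = 0
--     for i in apex:
--         current_sans_list = apex[:]
--         current_sans_list.remove(i)
--         for j in current_sans_list:
--             current_lcs = lcs(i, j)
--             if current_lcs > lcs_num:
--                 lcs_num = current_lcs
--     return lcs_num
--
-- def lcs(x, y):
--     """
--     The longest common substring (LCS)
--     :param x: First string
--     :param y: Second string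
--     :return LCS
--     """
--     m = len(x)
--     n = len(y)
--
--     h = [[None] * (n + 1) for i in range(m + 1)]
--
--     for i in range(m + 1):
--         for j in range(n + 1):
--             if i == 0 or j == 0:
--                 h[i][j] = 0
--             elif x[i - 1] == y[j - 1]:
--                 h[i][j] = h[i - 1][j - 1] + 1
--             else:
--                 h[i][j] = max(h[i - 1][j], h[i][j - 1])
--     return h[m][n]
-- ===== SOURCE B (Python) =====
-- from functools import lru_cache
--
-- def get_lcs_apex(apex):
--     """
--     Max pairwise LCS length over the array: memoized top-down recurrence
--     instead of A's DP table, and an index-skip double loop instead of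
--     A's copy-and-remove (same multiset of compared pairs).
--     """
--     @lru_cache(maxsize=None)
--     def rec(x, y):
--         if not x or not y:
--             return 0
--         if x[-1] == y[-1]:
--             return rec(x[:-1], y[:-1]) + 1
--         return max(rec(x[:-1], y), rec(x, y[:-1]))
--
--     best = 0
--     for k, s in enumerate(apex):
--         for l, t in enumerate(apex):
--             if k != l:
--                 best = max(best, rec(s, t))
--     return best
-- ===== Notes on version B (the rewrite author's own statement) =====
-- stated objective: alternative
-- what changed: lcs is computed by a memoized top-down recursion on the two suffix-trimmed strings instead of A's bottom-up (m+1)x(n+1) table, and the outer pair enumeration skips equal indices via enumerate instead of copying the list and removing the first occurrence of the current value (provably the same multiset of compared pairs, even with duplicates).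
import Mathlib
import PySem

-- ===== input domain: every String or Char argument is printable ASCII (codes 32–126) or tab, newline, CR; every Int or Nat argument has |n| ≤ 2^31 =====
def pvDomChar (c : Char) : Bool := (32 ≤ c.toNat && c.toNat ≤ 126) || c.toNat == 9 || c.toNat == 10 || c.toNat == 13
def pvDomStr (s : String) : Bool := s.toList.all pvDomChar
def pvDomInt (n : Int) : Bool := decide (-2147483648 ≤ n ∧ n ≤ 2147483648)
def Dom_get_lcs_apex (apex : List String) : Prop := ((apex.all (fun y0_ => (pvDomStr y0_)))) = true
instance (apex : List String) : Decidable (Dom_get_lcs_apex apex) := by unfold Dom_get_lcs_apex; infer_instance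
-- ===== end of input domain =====

-- B replaces A's bottom-up LCS table by the memoized top-down recurrence and A's
-- copy-and-remove outer loop by an enumerate index-skip loop (objective: alternative,
-- same asymptotic cost; equal even on duplicate entries).

-- ===== PORT A =====

-- One cell of A's table: the three branches of the inner loop body, in order.
-- x[i-1]/y[j-1] are only read when 1 ≤ i ≤ m, 1 ≤ j ≤ n, so getD with a dummy
-- default is exact; likewise each h-cell is written before it is read, so the
-- `None` initialisation never surfaces and rows/cells use getD defaults.
def pvCellA (xs ys : List Char) (i j : Nat) (prev row : List Int) : Int :=
  if i = 0 ∨ j = 0 then 0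
  else if xs.getD (i - 1) ' ' = ys.getD (j - 1) ' ' then prev.getD (j - 1) 0 + 1
  else max (prev.getD j 0) (row.getD (j - 1) 0)

-- the inner `for j in range(n + 1)` loop of lcs, filling row i left to right
def pvRowA (xs ys : List Char) (i : Nat) (prev : List Int) : List Int :=
  (List.range (ys.length + 1)).foldl (fun row j => row ++ [pvCellA xs ys i j prev row]) []

-- lcs(x, y): build the (m+1)×(n+1) table h row by row, return h[m][n]
def pvLcsA (x y : String) : Int :=
  let xs := x.toList
  let ys := y.toList
  let m := xs.length
  let n := ys.length
  let h := (List.range (m + 1)).foldl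
      (fun rows i => rows ++ [pvRowA xs ys i (rows.getD (i - 1) [])]) ([] : List (List Int))
  (h.getD m []).getD n 0

-- get_lcs_apex: for each i in apex, remove the first occurrence of i from a copy
-- (i is always a member, so remove? always succeeds and the getD default is dead),
-- then scan the rest keeping the running maximum via the `if current_lcs > lcs_num` test.
def get_lcs_apex (apex : List String) : Int :=
  apex.foldl (fun lcs_num i =>
    let current_sans_list := (PySem.List.remove? apex i).getD []
    current_sans_list.foldl (fun lcs_num j =>
      let current_lcs := pvLcsA i j
      if current_lcs > lcs_num then current_lcs else lcs_num) lcs_num) 0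

-- ===== PORT B =====

-- rec(x, y) of Source B: top-down recurrence on the last characters (the lru_cache is an
-- evaluation cache; the computed function is this recurrence).
def pvLcsB (x y : List Char) : Int :=
  if hx : x = [] then 0
  else if hy : y = [] then 0
  else if x.getLast hx = y.getLast hy then pvLcsB x.dropLast y.dropLast + 1
  else max (pvLcsB x.dropLast y) (pvLcsB x y.dropLast)
termination_by x.length + y.length
decreasing_by
  all_goals
    simp only [List.length_dropLast]
    have hx' : 0 < x.length := List.length_pos_iff.mpr hx
    have hy' : 0 < y.length := List.length_pos_iff.mpr hy
    omega

-- the double enumerate loop of Source B with the k ≠ l skip and max accumulator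
def get_lcs_apex_alt (apex : List String) : Int :=
  (PySem.List.enumerate apex).foldl (fun best ks =>
    (PySem.List.enumerate apex).foldl (fun best ls =>
      if ks.1 ≠ ls.1 then max best (pvLcsB ks.2.toList ls.2.toList) else best) best) 0

-- ===== PRECONDITION & SPEC =====
def Spec_get_lcs_apex (apex : List String) (out : Int) : Prop := out = get_lcs_apex_alt apex
instance (apex : List String) (out : Int) : Decidable (Spec_get_lcs_apex apex out) := by unfold Spec_get_lcs_apex; infer_instance

-- ===== CLAIM (what is proved, stated in full; the proofs are below) =====
def Claim_equal_get_lcs_apex : Prop := ∀ (apex : List String), Dom_get_lcs_apex apex → Spec_get_lcs_apex apex (get_lcs_apex apex)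

-- ===== LEMMAS AND PROOFS =====

theorem pvLcsB_nil_left (y : List Char) : pvLcsB [] y = 0 := by
  rw [pvLcsB]; simp

theorem pvLcsB_nil_right (x : List Char) : pvLcsB x [] = 0 := by
  rw [pvLcsB]; simp

-- the j-th column of the spec row: lcs of the two prefixes
def pvRowSpec (xs ys : List Char) (i : Nat) : List Int :=
  (List.range (ys.length + 1)).map (fun j => pvLcsB (xs.take i) (ys.take j))

-- the recursive lcs on prefixes satisfies exactly A's cell recurrence
theorem pvCell_rec (xs ys : List Char) (i j : Nat)
    (hi1 : 1 ≤ i) (hi2 : i ≤ xs.length) (hj1 : 1 ≤ j) (hj2 : j ≤ ys.length) :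
    pvLcsB (xs.take i) (ys.take j) =
      if xs.getD (i - 1) ' ' = ys.getD (j - 1) ' '
      then pvLcsB (xs.take (i - 1)) (ys.take (j - 1)) + 1
      else max (pvLcsB (xs.take (i - 1)) (ys.take j)) (pvLcsB (xs.take i) (ys.take (j - 1))) := by
  have hxl : 0 < xs.length := by omega
  have hyl : 0 < ys.length := by omega
  have hxt : xs.take i ≠ [] := by
    rw [Ne, List.take_eq_nil_iff]
    rintro (h | h)
    · omega
    · rw [h] at hxl; simp at hxl
  have hyt : ys.take j ≠ [] := by
    rw [Ne, List.take_eq_nil_iff]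
    rintro (h | h)
    · omega
    · rw [h] at hyl; simp at hyl
  have hlx : (xs.take i).length = i := by simp; omega
  have hly : (ys.take j).length = j := by simp; omega
  have hglx : (xs.take i).getLast hxt = xs.getD (i - 1) ' ' := by
    rw [List.getLast_eq_getElem, ← List.getD_eq_getElem _ ' ' _, hlx]
    rw [List.getD_eq_getElem _ _ (by omega), List.getD_eq_getElem _ _ (by omega),
      List.getElem_take]
  have hgly : (ys.take j).getLast hyt = ys.getD (j - 1) ' ' := by
    rw [List.getLast_eq_getElem, ← List.getD_eq_getElem _ ' ' _, hly]
    rw [List.getD_eq_getElem _ _ (by omega), List.getD_eq_getElem _ _ (by omega),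
      List.getElem_take]
  have hdlx : (xs.take i).dropLast = xs.take (i - 1) := by
    rw [List.dropLast_eq_take, hlx, List.take_take, min_eq_left (by omega)]
  have hdly : (ys.take j).dropLast = ys.take (j - 1) := by
    rw [List.dropLast_eq_take, hly, List.take_take, min_eq_left (by omega)]
  rw [pvLcsB, dif_neg hxt, dif_neg hyt, hglx, hgly, hdlx, hdly]

theorem pvRowSpec_getD (xs ys : List Char) (i j : Nat) (hj : j ≤ ys.length) :
    (pvRowSpec xs ys i).getD j 0 = pvLcsB (xs.take i) (ys.take j) := by
  unfold pvRowSpec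
  rw [List.getD_eq_getElem _ _ (by simp; omega)]
  simp

theorem pvRowA_aux (xs ys : List Char) (i : Nat) (prev : List Int)
    (hi : i ≤ xs.length)
    (hprev : 1 ≤ i → ∀ j, j ≤ ys.length → prev.getD j 0 = pvLcsB (xs.take (i - 1)) (ys.take j))
    (k : Nat) (hk : k ≤ ys.length + 1) :
    (List.range k).foldl (fun row j => row ++ [pvCellA xs ys i j prev row]) []
    = (List.range k).map (fun j => pvLcsB (xs.take i) (ys.take j)) := by
  induction k with
  | zero => simp
  | succ k ih =>
    rw [List.range_succ, List.foldl_append, List.map_append, ih (by omega)]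
    simp only [List.foldl_cons, List.foldl_nil, List.map_cons, List.map_nil]
    congr 1
    unfold pvCellA
    by_cases h0 : i = 0 ∨ k = 0
    · rw [if_pos h0]
      rcases h0 with h | h
      · subst h; simp [pvLcsB_nil_left]
      · subst h; simp [pvLcsB_nil_right]
    · push Not at h0
      rw [if_neg (by tauto)]
      have hk' : k ≤ ys.length := by omega
      have hrow : ((List.range k).map (fun j => pvLcsB (xs.take i) (ys.take j))).getD (k - 1) 0
          = pvLcsB (xs.take i) (ys.take (k - 1)) := by
        rw [List.getD_eq_getElem _ _ (by simp; omega)]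
        simp
      rw [hrow, hprev (by omega) (k - 1) (by omega), hprev (by omega) k hk']
      exact congrArg (fun z => [z]) (pvCell_rec xs ys i k (by omega) hi (by omega) hk').symm

-- building one row from a correct previous row yields the spec row
theorem pvRowA_spec (xs ys : List Char) (i : Nat) (prev : List Int)
    (hi : i ≤ xs.length)
    (hprev : 1 ≤ i → ∀ j, j ≤ ys.length → prev.getD j 0 = pvLcsB (xs.take (i - 1)) (ys.take j)) :
    pvRowA xs ys i prev = pvRowSpec xs ys i := by
  unfold pvRowA pvRowSpec
  exact pvRowA_aux xs ys i prev hi hprev (ys.length + 1) (le_refl _)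

-- the whole table is the list of spec rows
theorem pvTable_spec (xs ys : List Char) (k : Nat) (hk : k ≤ xs.length + 1) :
    (List.range k).foldl
      (fun rows i => rows ++ [pvRowA xs ys i (rows.getD (i - 1) [])]) ([] : List (List Int))
    = (List.range k).map (pvRowSpec xs ys) := by
  induction k with
  | zero => simp
  | succ k ih =>
    rw [List.range_succ, List.foldl_append, List.map_append, ih (by omega)]
    simp only [List.foldl_cons, List.foldl_nil, List.map_cons, List.map_nil]
    congr 2
    apply pvRowA_spec _ _ _ _ (by omega)
    intro h1 j hj
    have hget : ((List.range k).map (pvRowSpec xs ys)).getD (k - 1) [] = pvRowSpec xs ys (k - 1) := by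
      rw [List.getD_eq_getElem _ _ (by simp; omega)]
      simp
    rw [hget, pvRowSpec_getD _ _ _ _ hj]

theorem pvLcsA_eq (x y : String) : pvLcsA x y = pvLcsB x.toList y.toList := by
  unfold pvLcsA
  simp only []
  rw [pvTable_spec x.toList y.toList (x.toList.length + 1) (by omega)]
  have h1 : ((List.range (x.toList.length + 1)).map (pvRowSpec x.toList y.toList)).getD
      x.toList.length [] = pvRowSpec x.toList y.toList x.toList.length := by
    rw [List.getD_eq_getElem _ _ (by simp)]
    simp
  rw [h1, pvRowSpec_getD _ _ _ _ (le_refl _), List.take_length, List.take_length]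

-- skipping index s+pos while folding max over enumerate = folding max over eraseIdx pos
theorem pvSkipFold (g : String → Int) (l : List String) (s : Int) (k : Int) (acc : Int)
    (hk : k < s) :
    (PySem.List.enumerate l s).foldl
      (fun b p => if k ≠ p.1 then max b (g p.2) else b) acc
    = l.foldl (fun b v => max b (g v)) acc := by
  induction l generalizing s acc with
  | nil => simp [PySem.List.enumerate_nil]
  | cons a t ih =>
    rw [PySem.List.enumerate_cons]
    simp only [List.foldl_cons]
    rw [if_pos (by omega)]
    exact ih (s + 1) _ (by omega)

theorem pvSkipFold_main (g : String → Int) (l : List String) (s : Int) (pos : Nat) (acc : Int)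
    (hpos : pos < l.length) :
    (PySem.List.enumerate l s).foldl
      (fun b p => if (s + pos : Int) ≠ p.1 then max b (g p.2) else b) acc
    = (l.eraseIdx pos).foldl (fun b v => max b (g v)) acc := by
  induction l generalizing s pos acc with
  | nil => simp at hpos
  | cons a t ih =>
    rw [PySem.List.enumerate_cons]
    simp only [List.foldl_cons]
    cases pos with
    | zero =>
      rw [if_neg (by omega)]
      simpa using pvSkipFold g t (s + 1) (s + 0) acc (by omega)
    | succ p =>
      rw [if_pos (by omega)]
      rw [List.eraseIdx_cons_succ, List.foldl_cons]
      have hc : (s + ((p + 1 : Nat) : Int)) = (s + 1) + (p : Int) := by push_cast; ring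
      simp only [hc]
      exact ih (s + 1) p (max acc (g a)) (by simpa using hpos)

-- foldl max is invariant under permutation
theorem pvFoldlMaxPerm (l₁ l₂ : List Int) (h : l₁.Perm l₂) (a : Int) :
    l₁.foldl max a = l₂.foldl max a := by
  induction h generalizing a with
  | nil => rfl
  | cons x _ ih => simp only [List.foldl_cons]; exact ih _
  | swap x y l =>
    simp only [List.foldl_cons]
    congr 1
    omega
  | trans _ _ ih1 ih2 => rw [ih1, ih2]

-- l ~ l[pos] :: l.eraseIdx pos
theorem pvPermEraseIdx (l : List String) (pos : Nat) (h : pos < l.length) :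
    l.Perm (l[pos] :: l.eraseIdx pos) := by
  induction l generalizing pos with
  | nil => simp at h
  | cons a t ih =>
    cases pos with
    | zero => simp
    | succ p =>
      have hp : p < t.length := by simpa using h
      simpa using ((ih p hp).cons a).trans (List.Perm.swap _ _ _)

theorem pvEraseIdx_perm_erase (l : List String) (pos : Nat) (h : pos < l.length) :
    (l.eraseIdx pos).Perm (l.erase l[pos]) := by
  have h1 := pvPermEraseIdx l pos h
  have h2 : l.Perm (l[pos] :: l.erase l[pos]) :=
    List.perm_cons_erase (List.getElem_mem h)
  exact (List.perm_cons _).mp (h1.symm.trans h2)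

-- folding a step over a list equals folding the matching step over its enumeration
theorem pvOuter (apex : List String) (f : Int → String → Int) (g : Int → (Int × String) → Int)
    (h : ∀ (acc : Int), ∀ p ∈ PySem.List.enumerate apex 0, g acc p = f acc p.2) :
    (PySem.List.enumerate apex 0).foldl g 0 = apex.foldl f 0 := by
  rw [PySem.List.foldl_congr_mem _ g (fun a p => f a p.2) 0 h]
  have hm := List.foldl_map (f := fun p : Int × String => p.2) (g := f)
    (l := PySem.List.enumerate apex 0) (init := (0 : Int))
  rw [PySem.List.map_snd_enumerate] at hm
  exact hm.symm ▸ rfl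

-- ===== VERDICT (by name: the statement is the Claim_ definition above) =====
theorem get_lcs_apex_spec : Claim_equal_get_lcs_apex := by
  intro apex _
  unfold Spec_get_lcs_apex get_lcs_apex get_lcs_apex_alt
  refine (pvOuter apex _ _ ?_).symm
  intro acc p hp
  obtain ⟨k, hk, rfl⟩ := (PySem.List.mem_enumerate_iff apex 0 p).mp hp
  dsimp only
  rw [pvSkipFold_main (fun t => pvLcsB (apex[k]).toList t.toList) apex 0 k acc hk]
  rw [PySem.List.remove?_eq_some_erase apex _ (List.getElem_mem hk), Option.getD_some]
  have hstep : ∀ (a : Int) (j : String),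
      (if pvLcsA apex[k] j > a then pvLcsA apex[k] j else a)
        = max a (pvLcsB (apex[k]).toList j.toList) := by
    intro a j
    rw [pvLcsA_eq]
    split_ifs <;> omega
  calc (apex.eraseIdx k).foldl
        (fun b v => max b (pvLcsB (apex[k]).toList v.toList)) acc
      = ((apex.eraseIdx k).map (fun v => pvLcsB (apex[k]).toList v.toList)).foldl max acc :=
        List.foldl_map.symm
    _ = ((apex.erase apex[k]).map (fun v => pvLcsB (apex[k]).toList v.toList)).foldl max acc :=
        pvFoldlMaxPerm _ _ ((pvEraseIdx_perm_erase apex k hk).map _) acc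
    _ = (apex.erase apex[k]).foldl
        (fun a v => max a (pvLcsB (apex[k]).toList v.toList)) acc := List.foldl_map
    _ = (apex.erase apex[k]).foldl
        (fun lcs_num j => if pvLcsA apex[k] j > lcs_num then pvLcsA apex[k] j else lcs_num) acc := by
        rw [PySem.List.foldl_congr_mem _ _ _ acc (fun a j _ => (hstep a j).symm)]
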